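-- pv_equiv track=rewrite | github.com/iosec-shekhar/Lance | lance/engine/mutators/payload_mutator.py | unicode_confusables
-- ===== SOURCE A (Python) =====
-- def unicode_confusables(payload: str) -> str:
--     """Replace some chars with unicode lookalikes."""
--     replacements = {
--         "i": "\u0456",  # Cyrillic i
--         "a": "\u0430",  # Cyrillic a
--         "e": "\u0435",  # Cyrillic e
--         "o": "\u043e",  # Cyrillic o
--     }
--     mutated = payload
--     for char, replacement in replacements.items():
--         mutated = mutated.replace(char, replacement, 2)
--     return mutated
-- ===== SOURCE B (Python) =====
-- def unicode_confusables(payload: str) -> str: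
--     """Replace some chars with unicode lookalikes."""
--     lookalike = {
--         "i": "\u0456",  # Cyrillic i
--         "a": "\u0430",  # Cyrillic a
--         "e": "\u0435",  # Cyrillic e
--         "o": "\u043e",  # Cyrillic o
--     }
--     budget = {"i": 2, "a": 2, "e": 2, "o": 2}
--     out = []
--     for ch in payload:
--         if budget.get(ch, 0) > 0:
--             budget[ch] -= 1
--             out.append(lookalike[ch])
--         else:
--             out.append(ch)
--     return "".join(out)
-- ===== Notes on version B (the rewrite author's own statement) =====
-- stated objective: idiomatic
-- what changed: Four sequential str.replace passes over the whole string are replaced by one left-to-right pass keeping a per-character remaining-replacement budget.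
import Mathlib
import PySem

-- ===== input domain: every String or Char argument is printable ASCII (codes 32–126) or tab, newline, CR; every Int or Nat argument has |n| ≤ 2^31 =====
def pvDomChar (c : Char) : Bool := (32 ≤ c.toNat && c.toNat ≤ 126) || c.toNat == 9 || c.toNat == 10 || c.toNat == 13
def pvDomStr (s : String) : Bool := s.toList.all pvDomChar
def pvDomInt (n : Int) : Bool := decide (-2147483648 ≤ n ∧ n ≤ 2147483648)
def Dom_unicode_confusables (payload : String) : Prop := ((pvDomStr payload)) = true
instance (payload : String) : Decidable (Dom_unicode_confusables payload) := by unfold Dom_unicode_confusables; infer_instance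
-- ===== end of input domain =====

-- B replaces A's four sequential str.replace(_, _, 2) passes by one left-to-right pass with a
-- per-character remaining-replacement budget; same return value.

-- ===== PORT A =====
-- s.replace(old, new, 2) with single-char old/new: exact hand port (PySem.Str.replace has no count argument)
def pvReplaceN : List Char → Char → Char → Nat → List Char
  | [], _, _, _ => []
  | c :: cs, k, r, n => if c = k ∧ 0 < n then r :: pvReplaceN cs k r (n - 1) else c :: pvReplaceN cs k r n

-- the 'replacements' dict literal, the for-loop over .items() as a foldl over the mutated string
def unicode_confusables (payload : String) : String :=
  String.ofList (((PySem.Dict.ofList [('i', 'і'), ('a', 'а'), ('e', 'е'), ('o', 'о')]).items).foldl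
    (fun m p => pvReplaceN m p.1 p.2 2) payload.toList)

-- ===== PORT B =====
def ucLook : PySem.Dict Char Char := PySem.Dict.ofList [('i', 'і'), ('a', 'а'), ('e', 'е'), ('o', 'о')]
def ucBudget0 : PySem.Dict Char Int := PySem.Dict.ofList [('i', 2), ('a', 2), ('e', 2), ('o', 2)]

-- the for-loop of Source B as the obvious structural recursion over the characters;
-- lookalike[ch] is ucLook.getD ch ch (the key is present whenever the branch is taken: budget keys ⊆ lookalike keys)
def ucGo (budget : PySem.Dict Char Int) : List Char → List Char
  | [] => []
  | ch :: cs =>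
    if 0 < budget.getD ch 0 then
      ucLook.getD ch ch :: ucGo (budget.insert ch (budget.getD ch 0 - 1)) cs
    else
      ch :: ucGo budget cs

def unicode_confusables_alt (payload : String) : String :=
  String.ofList (ucGo ucBudget0 payload.toList)

-- ===== PRECONDITION & SPEC =====
def Spec_unicode_confusables (payload : String) (out : String) : Prop := out = unicode_confusables_alt payload
instance (payload : String) (out : String) : Decidable (Spec_unicode_confusables payload out) := by unfold Spec_unicode_confusables; infer_instance

-- ===== CLAIM (what is proved, stated in full; the proofs are below) =====
def Claim_equal_unicode_confusables : Prop := ∀ (payload : String), Dom_unicode_confusables payload → Spec_unicode_confusables payload (unicode_confusables payload)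

-- ===== LEMMAS AND PROOFS =====

lemma rN_cons_ne {c k r : Char} {n : Nat} (cs : List Char) (h : c ≠ k) :
    pvReplaceN (c :: cs) k r n = c :: pvReplaceN cs k r n := by
  simp [pvReplaceN, h]

lemma rN_cons_pos {k r : Char} {n : Nat} (cs : List Char) (h : 0 < n) :
    pvReplaceN (k :: cs) k r n = r :: pvReplaceN cs k r (n - 1) := by
  simp [pvReplaceN, h]

lemma rN_cons_zero {k r : Char} (cs : List Char) :
    pvReplaceN (k :: cs) k r 0 = k :: pvReplaceN cs k r 0 := by
  simp [pvReplaceN]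

-- the one-pass loop with budget d equals four sequential capped replaces, with caps the budgets in d,
-- provided d gives no budget to any character other than the four keys
lemma ucGo_eq (cs : List Char) : ∀ (d : PySem.Dict Char Int),
    (∀ ch : Char, ch ≠ 'i' → ch ≠ 'a' → ch ≠ 'e' → ch ≠ 'o' → ¬ (0 < d.getD ch 0)) →
    ucGo d cs =
      pvReplaceN (pvReplaceN (pvReplaceN (pvReplaceN cs 'i' 'і' (d.getD 'i' 0).toNat)
        'a' 'а' (d.getD 'a' 0).toNat) 'e' 'е' (d.getD 'e' 0).toNat) 'o' 'о' (d.getD 'o' 0).toNat := by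
  induction cs with
  | nil => intro d h; simp [ucGo, pvReplaceN]
  | cons ch cs ih =>
    intro d h
    by_cases hi : ch = 'i'
    · subst hi
      by_cases hv : 0 < d.getD 'i' 0
      · have h' : ∀ ch : Char, ch ≠ 'i' → ch ≠ 'a' → ch ≠ 'e' → ch ≠ 'o' →
            ¬ (0 < (d.insert 'i' (d.getD 'i' 0 - 1)).getD ch 0) := by
          intro c h1 h2 h3 h4
          rw [PySem.Dict.getD_insert, if_neg h1]; exact h c h1 h2 h3 h4
        simp only [ucGo]
        rw [if_pos hv, ih _ h']
        rw [show (d.insert 'i' (d.getD 'i' 0 - 1)).getD 'i' 0 = d.getD 'i' 0 - 1 from by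
              rw [PySem.Dict.getD_insert]; simp,
            show (d.insert 'i' (d.getD 'i' 0 - 1)).getD 'a' 0 = d.getD 'a' 0 from by
              rw [PySem.Dict.getD_insert]; simp,
            show (d.insert 'i' (d.getD 'i' 0 - 1)).getD 'e' 0 = d.getD 'e' 0 from by
              rw [PySem.Dict.getD_insert]; simp,
            show (d.insert 'i' (d.getD 'i' 0 - 1)).getD 'o' 0 = d.getD 'o' 0 from by
              rw [PySem.Dict.getD_insert]; simp]
        rw [rN_cons_pos (k := 'i') (r := 'і') (n := (d.getD 'i' 0).toNat) cs (by omega)]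
        rw [rN_cons_ne (c := 'і') (k := 'a') _ (by decide),
            rN_cons_ne (c := 'і') (k := 'e') _ (by decide),
            rN_cons_ne (c := 'і') (k := 'o') _ (by decide)]
        rw [show (d.getD 'i' 0 - 1).toNat = (d.getD 'i' 0).toNat - 1 from by omega]
        rfl
      · have h0 : (d.getD 'i' 0).toNat = 0 := by omega
        simp only [ucGo]
        rw [if_neg hv, ih d h, h0]
        rw [rN_cons_zero (k := 'i') (r := 'і') cs,
            rN_cons_ne (c := 'i') (k := 'a') _ (by decide),
            rN_cons_ne (c := 'i') (k := 'e') _ (by decide),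
            rN_cons_ne (c := 'i') (k := 'o') _ (by decide)]
    · by_cases ha : ch = 'a'
      · subst ha
        by_cases hv : 0 < d.getD 'a' 0
        · have h' : ∀ ch : Char, ch ≠ 'i' → ch ≠ 'a' → ch ≠ 'e' → ch ≠ 'o' →
              ¬ (0 < (d.insert 'a' (d.getD 'a' 0 - 1)).getD ch 0) := by
            intro c h1 h2 h3 h4
            rw [PySem.Dict.getD_insert, if_neg h2]; exact h c h1 h2 h3 h4
          simp only [ucGo]
          rw [if_pos hv, ih _ h']
          rw [show (d.insert 'a' (d.getD 'a' 0 - 1)).getD 'i' 0 = d.getD 'i' 0 from by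
                rw [PySem.Dict.getD_insert]; simp,
              show (d.insert 'a' (d.getD 'a' 0 - 1)).getD 'a' 0 = d.getD 'a' 0 - 1 from by
                rw [PySem.Dict.getD_insert]; simp,
              show (d.insert 'a' (d.getD 'a' 0 - 1)).getD 'e' 0 = d.getD 'e' 0 from by
                rw [PySem.Dict.getD_insert]; simp,
              show (d.insert 'a' (d.getD 'a' 0 - 1)).getD 'o' 0 = d.getD 'o' 0 from by
                rw [PySem.Dict.getD_insert]; simp]
          rw [rN_cons_ne (c := 'a') (k := 'i') cs (by decide)]
          rw [rN_cons_pos (k := 'a') (r := 'а') (n := (d.getD 'a' 0).toNat) _ (by omega)]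
          rw [rN_cons_ne (c := 'а') (k := 'e') _ (by decide),
              rN_cons_ne (c := 'а') (k := 'o') _ (by decide)]
          rw [show (d.getD 'a' 0 - 1).toNat = (d.getD 'a' 0).toNat - 1 from by omega]
          rfl
        · have h0 : (d.getD 'a' 0).toNat = 0 := by omega
          simp only [ucGo]
          rw [if_neg hv, ih d h, h0]
          rw [rN_cons_ne (c := 'a') (k := 'i') cs (by decide),
              rN_cons_zero (k := 'a') (r := 'а') _,
              rN_cons_ne (c := 'a') (k := 'e') _ (by decide),
              rN_cons_ne (c := 'a') (k := 'o') _ (by decide)]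
      · by_cases he : ch = 'e'
        · subst he
          by_cases hv : 0 < d.getD 'e' 0
          · have h' : ∀ ch : Char, ch ≠ 'i' → ch ≠ 'a' → ch ≠ 'e' → ch ≠ 'o' →
                ¬ (0 < (d.insert 'e' (d.getD 'e' 0 - 1)).getD ch 0) := by
              intro c h1 h2 h3 h4
              rw [PySem.Dict.getD_insert, if_neg h3]; exact h c h1 h2 h3 h4
            simp only [ucGo]
            rw [if_pos hv, ih _ h']
            rw [show (d.insert 'e' (d.getD 'e' 0 - 1)).getD 'i' 0 = d.getD 'i' 0 from by
                  rw [PySem.Dict.getD_insert]; simp,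
                show (d.insert 'e' (d.getD 'e' 0 - 1)).getD 'a' 0 = d.getD 'a' 0 from by
                  rw [PySem.Dict.getD_insert]; simp,
                show (d.insert 'e' (d.getD 'e' 0 - 1)).getD 'e' 0 = d.getD 'e' 0 - 1 from by
                  rw [PySem.Dict.getD_insert]; simp,
                show (d.insert 'e' (d.getD 'e' 0 - 1)).getD 'o' 0 = d.getD 'o' 0 from by
                  rw [PySem.Dict.getD_insert]; simp]
            rw [rN_cons_ne (c := 'e') (k := 'i') cs (by decide),
                rN_cons_ne (c := 'e') (k := 'a') _ (by decide)]
            rw [rN_cons_pos (k := 'e') (r := 'е') (n := (d.getD 'e' 0).toNat) _ (by omega)]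
            rw [rN_cons_ne (c := 'е') (k := 'o') _ (by decide)]
            rw [show (d.getD 'e' 0 - 1).toNat = (d.getD 'e' 0).toNat - 1 from by omega]
            rfl
          · have h0 : (d.getD 'e' 0).toNat = 0 := by omega
            simp only [ucGo]
            rw [if_neg hv, ih d h, h0]
            rw [rN_cons_ne (c := 'e') (k := 'i') cs (by decide),
                rN_cons_ne (c := 'e') (k := 'a') _ (by decide),
                rN_cons_zero (k := 'e') (r := 'е') _,
                rN_cons_ne (c := 'e') (k := 'o') _ (by decide)]
        · by_cases ho : ch = 'o'
          · subst ho
            by_cases hv : 0 < d.getD 'o' 0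
            · have h' : ∀ ch : Char, ch ≠ 'i' → ch ≠ 'a' → ch ≠ 'e' → ch ≠ 'o' →
                  ¬ (0 < (d.insert 'o' (d.getD 'o' 0 - 1)).getD ch 0) := by
                intro c h1 h2 h3 h4
                rw [PySem.Dict.getD_insert, if_neg h4]; exact h c h1 h2 h3 h4
              simp only [ucGo]
              rw [if_pos hv, ih _ h']
              rw [show (d.insert 'o' (d.getD 'o' 0 - 1)).getD 'i' 0 = d.getD 'i' 0 from by
                    rw [PySem.Dict.getD_insert]; simp,
                  show (d.insert 'o' (d.getD 'o' 0 - 1)).getD 'a' 0 = d.getD 'a' 0 from by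
                    rw [PySem.Dict.getD_insert]; simp,
                  show (d.insert 'o' (d.getD 'o' 0 - 1)).getD 'e' 0 = d.getD 'e' 0 from by
                    rw [PySem.Dict.getD_insert]; simp,
                  show (d.insert 'o' (d.getD 'o' 0 - 1)).getD 'o' 0 = d.getD 'o' 0 - 1 from by
                    rw [PySem.Dict.getD_insert]; simp]
              rw [rN_cons_ne (c := 'o') (k := 'i') cs (by decide),
                  rN_cons_ne (c := 'o') (k := 'a') _ (by decide),
                  rN_cons_ne (c := 'o') (k := 'e') _ (by decide)]
              rw [rN_cons_pos (k := 'o') (r := 'о') (n := (d.getD 'o' 0).toNat) _ (by omega)]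
              rw [show (d.getD 'o' 0 - 1).toNat = (d.getD 'o' 0).toNat - 1 from by omega]
              rfl
            · have h0 : (d.getD 'o' 0).toNat = 0 := by omega
              simp only [ucGo]
              rw [if_neg hv, ih d h, h0]
              rw [rN_cons_ne (c := 'o') (k := 'i') cs (by decide),
                  rN_cons_ne (c := 'o') (k := 'a') _ (by decide),
                  rN_cons_ne (c := 'o') (k := 'e') _ (by decide),
                  rN_cons_zero (k := 'o') (r := 'о') _]
          · have hv : ¬ (0 < d.getD ch 0) := h ch hi ha he ho
            simp only [ucGo]
            rw [if_neg hv, ih d h]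
            rw [rN_cons_ne cs hi, rN_cons_ne _ ha, rN_cons_ne _ he, rN_cons_ne _ ho]

lemma ucBudget0_other (c : Char) (h1 : c ≠ 'i') (h2 : c ≠ 'a') (h3 : c ≠ 'e') (h4 : c ≠ 'o') :
    ¬ (0 < ucBudget0.getD c 0) := by
  have hb : ucBudget0 = PySem.Dict.mk [('i', 2), ('a', 2), ('e', 2), ('o', 2)] := by decide
  rw [hb]
  simp [PySem.Dict.getD, PySem.Dict.get?, Ne.symm h1, Ne.symm h2, Ne.symm h3, Ne.symm h4]

-- ===== VERDICT (by name: the statement is the Claim_ definition above) =====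
theorem unicode_confusables_spec : Claim_equal_unicode_confusables := by
  intro payload _
  show unicode_confusables payload = unicode_confusables_alt payload
  unfold unicode_confusables unicode_confusables_alt
  rw [show (PySem.Dict.ofList [('i', 'і'), ('a', 'а'), ('e', 'е'), ('o', 'о')]).items
        = [('i', 'і'), ('a', 'а'), ('e', 'е'), ('o', 'о')] from by decide]
  simp only [List.foldl]
  rw [ucGo_eq payload.toList ucBudget0 ucBudget0_other]
  rw [show ucBudget0.getD 'i' 0 = 2 from by decide, show ucBudget0.getD 'a' 0 = 2 from by decide,
      show ucBudget0.getD 'e' 0 = 2 from by decide, show ucBudget0.getD 'o' 0 = 2 from by decide]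
  rfl
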